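-- pv_equiv track=rewrite | github.com/jrezin1201/RCW-Processing-Suite | app/services/category_mapper.py | organize_headers
-- ===== SOURCE A (Python) =====
-- from typing import Optional, Dict, List, Any, Tuple, Set
--
-- def _strip_prefix(h: str) -> str:
--     """Strip INT/EXT/INTERIOR/EXTERIOR prefix from header for matching."""
--     for prefix in ['INTERIOR ', 'EXTERIOR ', 'INT ', 'EXT ']:
--         if h.startswith(prefix):
--             h = h[len(prefix):].strip()
--             break
--     # Strip leading punctuation left behind (e.g. "/ PREP & ENAMEL")
--     h = h.lstrip('/ -&')
--     return h
--
-- def organize_headers(headers: List[str]) -> List[str]: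
--     """
--     Organize headers so UA variants are placed next to their base category.
--
--     Uses multi-strategy matching:
--     1. Exact match on normalized names (strip prefix + UA suffix)
--     2. Normalized substring match (higher priority)
--     3. Raw substring match (fallback)
--     """
--     ua_headers = [h for h in headers if h.upper().strip().endswith(' UA')]
--     non_ua_headers = [h for h in headers if not h.upper().strip().endswith(' UA')]
--
--     # Match each UA header to its best non-UA base
--     ua_to_base: Dict[str, str] = {}
--
--     for ua in ua_headers:
--         ua_upper = ua.upper().strip()
--         ua_raw = ua_upper[:-3].strip()  # Strip " UA"
--         ua_norm = _strip_prefix(ua_raw)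
--
--         best_match = None
--         best_score = 0
--
--         for base in non_ua_headers:
--             base_upper = base.upper().strip()
--             base_norm = _strip_prefix(base_upper)
--
--             # Strategy 1: Exact normalized match
--             if ua_norm == base_norm:
--                 best_match = base
--                 break
--
--             # Strategy 2: Normalized substring (boosted score)
--             if base_norm in ua_norm and len(base_norm) + 100 > best_score:
--                 best_match = base
--                 best_score = len(base_norm) + 100
--             elif ua_norm in base_norm and len(ua_norm) + 100 > best_score:
--                 best_match = base
--                 best_score = len(ua_norm) + 100
--
--             # Strategy 3: Raw substring (lower priority fallback)
--             if base_upper in ua_raw and len(base_upper) > best_score and best_score < 100: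
--                 best_match = base
--                 best_score = len(base_upper)
--
--         if best_match:
--             ua_to_base[ua] = best_match
--
--     # Build result: each non-UA header followed by its UA partner(s)
--     result = []
--     placed_ua: Set[str] = set()
--
--     for header in non_ua_headers:
--         result.append(header)
--         for ua in ua_headers:
--             if ua not in placed_ua and ua_to_base.get(ua) == header:
--                 result.append(ua)
--                 placed_ua.add(ua)
--
--     # Append any unmatched UA headers at the end
--     for ua in ua_headers:
--         if ua not in placed_ua:
--             result.append(ua)
--
--     return result
-- ===== SOURCE B (Python) =====
-- from typing import Dict, List, Optional, Set, Tuple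
--
-- def _strip_prefix(h: str) -> str:
--     """Strip INT/EXT/INTERIOR/EXTERIOR prefix from header for matching."""
--     for prefix in ['INTERIOR ', 'EXTERIOR ', 'INT ', 'EXT ']:
--         if h.startswith(prefix):
--             h = h[len(prefix):].strip()
--             break
--     h = h.lstrip('/ -&')
--     return h
--
-- def _match(ua_raw: str, ua_norm: str,
--            infos: List[Tuple[str, str, str]]) -> Optional[str]:
--     """Order-dependent scoring over precomputed (base, upper, norm) triples,
--     semantically identical to the original matching phase."""
--     best: Optional[str] = None
--     score = 0
--     for base, base_upper, base_norm in infos: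
--         if ua_norm == base_norm:
--             return base
--         if base_norm in ua_norm and len(base_norm) + 100 > score:
--             best, score = base, len(base_norm) + 100
--         elif ua_norm in base_norm and len(ua_norm) + 100 > score:
--             best, score = base, len(ua_norm) + 100
--         if base_upper in ua_raw and len(base_upper) > score and score < 100:
--             best, score = base, len(base_upper)
--     return best
--
-- def organize_headers(headers: List[str]) -> List[str]:
--     ua_headers = [h for h in headers if h.upper().strip().endswith(' UA')]
--     non_ua_headers = [h for h in headers if not h.upper().strip().endswith(' UA')]
--
--     # Precompute each base's normalized forms once (A recomputes them per UA x base).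
--     infos: List[Tuple[str, str, str]] = []
--     for b in non_ua_headers:
--         bu = b.upper().strip()
--         infos.append((b, bu, _strip_prefix(bu)))
--
--     # Group matched UA headers (distinct strings, first-occurrence order) under their base.
--     groups: Dict[str, List[str]] = {}
--     matched: Set[str] = set()
--     for ua in ua_headers:
--         if ua in matched:
--             continue
--         ua_raw = ua.upper().strip()[:-3].strip()
--         base = _match(ua_raw, _strip_prefix(ua_raw), infos)
--         if base:
--             matched.add(ua)
--             groups.setdefault(base, []).append(ua)
--
--     # Single emission pass: each base header, its UA group under the first
--     # occurrence of that base string only.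
--     result: List[str] = []
--     seen: Set[str] = set()
--     for h in non_ua_headers:
--         result.append(h)
--         if h not in seen:
--             seen.add(h)
--             result.extend(groups.get(h, []))
--
--     result.extend(ua for ua in ua_headers if ua not in matched)
--     return result
-- ===== Notes on version B (the rewrite author's own statement) =====
-- stated objective: alternative
-- what changed: The matching scores are kept semantically identical but driven by a precomputed table of (base, upper, normalized) triples built once instead of re-normalizing every base for every UA header, each distinct UA string is matched only once, and A's quadratic result-building (rescanning all UA headers after every base header, guarded by placed_ua) is replaced by a base->[UA partners] grouping dict plus one emission pass with a seen-set so a group is emitted only under the first occurrence of a duplicate base.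
import Mathlib
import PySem

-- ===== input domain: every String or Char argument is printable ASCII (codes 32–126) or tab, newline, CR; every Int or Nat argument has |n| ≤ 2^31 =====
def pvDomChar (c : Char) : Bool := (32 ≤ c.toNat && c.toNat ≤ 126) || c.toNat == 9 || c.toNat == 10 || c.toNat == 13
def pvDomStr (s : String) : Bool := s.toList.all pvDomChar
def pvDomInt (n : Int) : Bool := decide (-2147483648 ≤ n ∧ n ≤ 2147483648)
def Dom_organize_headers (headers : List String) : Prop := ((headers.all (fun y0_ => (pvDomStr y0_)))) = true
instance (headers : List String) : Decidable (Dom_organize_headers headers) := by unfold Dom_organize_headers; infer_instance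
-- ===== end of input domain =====

-- B keeps the order-dependent scoring semantics but drives it from a table of
-- precomputed (base, upper, normalized) triples, matches each distinct UA string
-- once, and replaces A's quadratic result-building (rescan of all UA headers per
-- base) by a grouping dict plus one emission pass (objective: alternative).

-- ===== PORT A =====

-- hand port of h.lstrip('/ -&'): drop leading chars from that set (exact for ASCII lstrip with a char set)
def pvLstripPunct (cs : List Char) : List Char :=
  cs.dropWhile (fun c => c == '/' || c == ' ' || c == '-' || c == '&')

-- _strip_prefix: the 4-prefix loop with break, unrolled in source order
def pvStripPrefix (h : List Char) : List Char :=
  let h1 :=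
    if PySem.Chars.startswith h "INTERIOR ".toList then PySem.Chars.strip (PySem.List.slice h (some 9) none)
    else if PySem.Chars.startswith h "EXTERIOR ".toList then PySem.Chars.strip (PySem.List.slice h (some 9) none)
    else if PySem.Chars.startswith h "INT ".toList then PySem.Chars.strip (PySem.List.slice h (some 4) none)
    else if PySem.Chars.startswith h "EXT ".toList then PySem.Chars.strip (PySem.List.slice h (some 4) none)
    else h
  pvLstripPunct h1

-- h.upper().strip().endswith(' UA')
def pvIsUA (h : String) : Bool :=
  PySem.Chars.endswith (PySem.Chars.strip (PySem.Chars.upper h.toList)) " UA".toList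

-- ua_raw = ua.upper().strip()[:-3].strip()
def pvUaRaw (ua : String) : List Char :=
  PySem.Chars.strip (PySem.List.slice (PySem.Chars.strip (PySem.Chars.upper ua.toList)) none (some (-3)))

def pvUaNorm (ua : String) : List Char := pvStripPrefix (pvUaRaw ua)

-- A's scoring loop over non-UA bases: early return on exact normalized match,
-- otherwise best_match/best_score state (score is a Python int)
def pvBestBaseGo (uaRaw uaNorm : List Char) (bases : List String)
    (best : Option String) (score : Int) : Option String :=
  match bases with
  | [] => best
  | base :: rest =>
    let baseUpper := PySem.Chars.strip (PySem.Chars.upper base.toList)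
    let baseNorm := pvStripPrefix baseUpper
    if uaNorm == baseNorm then some base
    else
      let bs1 : Option String × Int :=
        if PySem.Chars.isIn baseNorm uaNorm && decide ((baseNorm.length : Int) + 100 > score) then
          (some base, (baseNorm.length : Int) + 100)
        else if PySem.Chars.isIn uaNorm baseNorm && decide ((uaNorm.length : Int) + 100 > score) then
          (some base, (uaNorm.length : Int) + 100)
        else (best, score)
      let bs2 : Option String × Int :=
        if PySem.Chars.isIn baseUpper uaRaw && decide ((baseUpper.length : Int) > bs1.2) && decide (bs1.2 < 100) then
          (some base, (baseUpper.length : Int))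
        else bs1
      pvBestBaseGo uaRaw uaNorm rest bs2.1 bs2.2

def pvBestBase (ua : String) (bases : List String) : Option String :=
  pvBestBaseGo (pvUaRaw ua) (pvUaNorm ua) bases none 0

def organize_headers (headers : List String) : List String :=
  let uaH := headers.filter (fun h => pvIsUA h)
  let nonUa := headers.filter (fun h => !(pvIsUA h))
  -- ua_to_base: `if best_match:` is Python truthiness (None and '' both falsy)
  let uaToBase : PySem.Dict String String :=
    uaH.foldl (fun d ua =>
      match pvBestBase ua nonUa with
      | some b => if b == "" then d else d.insert ua b
      | none => d) PySem.Dict.empty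
  -- result/placed_ua loop: for each base header, rescan all UA headers
  let rp : List String × PySem.Set String :=
    nonUa.foldl (fun st h =>
      uaH.foldl (fun st2 ua =>
        if !(PySem.Set.contains st2.2 ua) && (uaToBase.get? ua == some h) then
          (st2.1 ++ [ua], PySem.Set.add st2.2 ua)
        else st2) (st.1 ++ [h], st.2))
      (([] : List String), ([] : PySem.Set String))
  rp.1 ++ uaH.filter (fun ua => !(PySem.Set.contains rp.2 ua))

-- ===== PORT B =====

-- infos: each base with its upper/strip and normalized form, computed once
def pvBInfo (bases : List String) : List (String × List Char × List Char) :=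
  bases.map (fun b =>
    let bu := PySem.Chars.strip (PySem.Chars.upper b.toList)
    (b, bu, pvStripPrefix bu))

-- _match: the same order-dependent scoring, over the precomputed triples,
-- with a Nat score (Python's score here is always a nonnegative length)
def pvMatch (uaRaw uaNorm : List Char) :
    List (String × List Char × List Char) → Option String → Nat → Option String
  | [], best, _ => best
  | (base, bu, bn) :: rest, best, score =>
    if uaNorm == bn then some base
    else
      let p : Option String × Nat :=
        if PySem.Chars.isIn bn uaNorm && decide (bn.length + 100 > score) then
          (some base, bn.length + 100)
        else if PySem.Chars.isIn uaNorm bn && decide (uaNorm.length + 100 > score) then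
          (some base, uaNorm.length + 100)
        else (best, score)
      if PySem.Chars.isIn bu uaRaw && decide (bu.length > p.2) && decide (p.2 < 100) then
        pvMatch uaRaw uaNorm rest (some base) bu.length
      else
        pvMatch uaRaw uaNorm rest p.1 p.2

-- grouping pass: groups (base → its UA partners) and matched, one scan of the UA headers
def pvGroup (infos : List (String × List Char × List Char)) :
    List String → PySem.Dict String (List String) → PySem.Set String →
    PySem.Dict String (List String) × PySem.Set String
  | [], g, m => (g, m)
  | ua :: rest, g, m =>
    if PySem.Set.contains m ua then pvGroup infos rest g m
    else
      let uaRaw := PySem.Chars.strip (PySem.List.slice (PySem.Chars.strip (PySem.Chars.upper ua.toList)) none (some (-3)))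
      match pvMatch uaRaw (pvStripPrefix uaRaw) infos none 0 with
      | some b =>
        if b == "" then pvGroup infos rest g m
        else pvGroup infos rest (g.modify b [] (· ++ [ua])) (PySem.Set.add m ua)
      | none => pvGroup infos rest g m

-- emission pass: each base header, its UA group under the first occurrence only
def pvEmit (g : PySem.Dict String (List String)) :
    List String → List String → PySem.Set String → List String
  | [], out, _ => out
  | h :: rest, out, seen =>
    if PySem.Set.contains seen h then pvEmit g rest (out ++ [h]) seen
    else pvEmit g rest (out ++ [h] ++ g.getD h []) (PySem.Set.add seen h)

def organize_headers_alt (headers : List String) : List String :=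
  let uaH := headers.filter (fun h => pvIsUA h)
  let nonUa := headers.filter (fun h => !(pvIsUA h))
  let gm := pvGroup (pvBInfo nonUa) uaH PySem.Dict.empty []
  pvEmit gm.1 nonUa [] [] ++ uaH.filter (fun ua => !(PySem.Set.contains gm.2 ua))

-- ===== PRECONDITION & SPEC =====
def Spec_organize_headers (headers : List String) (out : List String) : Prop := out = organize_headers_alt headers
instance (headers : List String) (out : List String) : Decidable (Spec_organize_headers headers out) := by unfold Spec_organize_headers; infer_instance

-- ===== CLAIM (what is proved, stated in full; the proofs are below) =====
def Claim_equal_organize_headers : Prop := ∀ (headers : List String), Dom_organize_headers headers → Spec_organize_headers headers (organize_headers headers)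

-- ===== LEMMAS AND PROOFS =====

-- B's Nat-scored matcher over the precomputed triples computes A's best base
theorem pvMatch_eq (uaRaw uaNorm : List Char) (bases : List String) :
    ∀ (best : Option String) (s : Nat),
    pvMatch uaRaw uaNorm (pvBInfo bases) best s
      = pvBestBaseGo uaRaw uaNorm bases best (s : Int) := by
  induction bases with
  | nil => intro best s; rfl
  | cons base rest ih =>
    intro best s
    simp only [pvBInfo, List.map_cons] at *
    simp only [pvMatch, pvBestBaseGo]
    set bu := PySem.Chars.strip (PySem.Chars.upper base.toList) with hbu
    set bn := pvStripPrefix bu with hbn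
    by_cases h0 : uaNorm == bn
    · simp [h0]
    · rw [if_neg h0, if_neg h0]
      have e1 : decide ((bn.length : Int) + 100 > (s : Int)) = decide (bn.length + 100 > s) :=
        decide_eq_decide.mpr (by omega)
      have e2 : decide ((uaNorm.length : Int) + 100 > (s : Int)) = decide (uaNorm.length + 100 > s) :=
        decide_eq_decide.mpr (by omega)
      rw [e1, e2]
      set p : Option String × Nat :=
        if PySem.Chars.isIn bn uaNorm && decide (bn.length + 100 > s) then
          (some base, bn.length + 100)
        else if PySem.Chars.isIn uaNorm bn && decide (uaNorm.length + 100 > s) then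
          (some base, uaNorm.length + 100)
        else (best, s) with hp
    -- A's intermediate pair is B's, with the score cast to Int
      have hcast : (if PySem.Chars.isIn bn uaNorm && decide (bn.length + 100 > s) then
            (some base, (bn.length : Int) + 100)
          else if PySem.Chars.isIn uaNorm bn && decide (uaNorm.length + 100 > s) then
            (some base, (uaNorm.length : Int) + 100)
          else (best, (s : Int))) = (p.1, (p.2 : Int)) := by
        rw [hp]; split_ifs <;> simp
      rw [hcast]
      have e3 : decide ((bu.length : Int) > ((p.2 : Nat) : Int)) = decide (bu.length > p.2) :=
        decide_eq_decide.mpr (by omega)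
      have e4 : decide (((p.2 : Nat) : Int) < 100) = decide (p.2 < 100) :=
        decide_eq_decide.mpr (by omega)
      simp only [e3, e4]
      by_cases h3 : (PySem.Chars.isIn bu uaRaw && decide (bu.length > p.2) && decide (p.2 < 100)) = true
      · rw [if_pos h3, if_pos h3]; exact ih (some base) bu.length
      · rw [if_neg h3, if_neg h3]; exact ih p.1 p.2

-- the effective match function: best base of ua among nonUa, with '' and None both "no match"
def pvF (nonUa : List String) (ua : String) : Option String :=
  match pvBestBase ua nonUa with
  | some b => if b == "" then none else some b
  | none => none

-- what A's dict lookup computes: pvF for UA headers, none elsewhere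
def pvG (uaH nonUa : List String) (x : String) : Option String :=
  if x ∈ uaH then pvF nonUa x else none

-- the elements of l not in p, first occurrences only, in order
def pvNew (p : List String) : List String → List String
  | [] => []
  | x :: xs => if x ∈ p then pvNew p xs else x :: pvNew (p ++ [x]) xs

theorem mem_pvNew (x : String) (l : List String) : ∀ p, x ∈ pvNew p l ↔ x ∈ l ∧ x ∉ p := by
  induction l with
  | nil => simp [pvNew]
  | cons y ys ih =>
    intro p
    by_cases hy : y ∈ p <;> by_cases hxy : x = y
    · subst hxy; simp [pvNew, hy, ih]
    · simp [pvNew, hy, ih, hxy]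
    · subst hxy; simp [pvNew, hy, ih]
    · simp [pvNew, hy, ih, hxy]

theorem pvNew_congr (l : List String) : ∀ p q, (∀ x ∈ l, x ∈ p ↔ x ∈ q) →
    pvNew p l = pvNew q l := by
  induction l with
  | nil => intro p q _; rfl
  | cons y ys ih =>
    intro p q h
    have hy := h y (List.mem_cons_self)
    by_cases hyp : y ∈ p
    · simp only [pvNew, if_pos hyp, if_pos (hy.1 hyp)]
      exact ih p q (fun x hx => h x (List.mem_cons_of_mem _ hx))
    · simp only [pvNew, if_neg hyp, if_neg (fun hq => hyp (hy.2 hq))]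
      refine congrArg _ (ih _ _ ?_)
      intro x hx
      simp only [List.mem_append, List.mem_singleton]
      exact or_congr (h x (List.mem_cons_of_mem _ hx)) Iff.rfl

theorem pvNew_nil_of_forall_mem (l : List String) : ∀ p, (∀ x ∈ l, x ∈ p) → pvNew p l = [] := by
  induction l with
  | nil => intro p _; rfl
  | cons y ys ih =>
    intro p h
    simp only [pvNew, if_pos (h y List.mem_cons_self)]
    exact ih p (fun x hx => h x (List.mem_cons_of_mem _ hx))

theorem pvNew_append (l l' : List String) : ∀ p,
    pvNew p (l ++ l') = pvNew p l ++ pvNew (p ++ pvNew p l) l' := by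
  induction l with
  | nil => intro p; simp [pvNew]
  | cons y ys ih =>
    intro p
    by_cases hy : y ∈ p
    · simp only [List.cons_append, pvNew, if_pos hy, ih]
    · simp only [List.cons_append, pvNew, if_neg hy, ih, List.cons_append,
        List.append_assoc]
      simp

theorem pvBestBaseGo_mem (uaRaw uaNorm : List Char) (bases : List String) :
    ∀ (best : Option String) (score : Int) (b : String),
    pvBestBaseGo uaRaw uaNorm bases best score = some b →
    b ∈ bases ∨ best = some b := by
  induction bases with
  | nil => intro best score b h; exact Or.inr h
  | cons base rest ih =>
    intro best score b h
    simp only [pvBestBaseGo] at h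
    split at h
    · have hbb : base = b := Option.some_inj.1 h
      subst hbb
      exact Or.inl List.mem_cons_self
    · rcases ih _ _ _ h with h1 | h1
      · exact Or.inl (List.mem_cons_of_mem _ h1)
      · revert h1
        split_ifs <;> intro h1 <;>
          first
          | exact Or.inr h1
          | · have hbb : base = b := Option.some_inj.1 (show some base = some b from h1)
              subst hbb
              exact Or.inl List.mem_cons_self

theorem pvF_mem (nonUa : List String) (ua b : String) (h : pvF nonUa ua = some b) : b ∈ nonUa := by
  unfold pvF at h
  cases hb : pvBestBase ua nonUa with
  | none => rw [hb] at h; exact absurd h (by simp)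
  | some b' =>
    rw [hb] at h
    dsimp only at h
    by_cases hbe : b' = ""
    · rw [if_pos (by simpa using hbe)] at h
      exact absurd h (by simp)
    · rw [if_neg (by simpa using hbe)] at h
      have hbb : b' = b := Option.some_inj.1 h
      subst hbb
      rcases pvBestBaseGo_mem _ _ _ _ _ _ hb with h1 | h1
      · exact h1
      · exact absurd h1 (by simp)

-- A's uaToBase lookup, characterized
theorem uaToBase_get? (nonUa : List String) (U : List String) :
    ∀ (P : List String) (d : PySem.Dict String String),
    (∀ x, d.get? x = pvG P nonUa x) →
    ∀ x, (U.foldl (fun d ua =>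
      match pvBestBase ua nonUa with
      | some b => if b == "" then d else d.insert ua b
      | none => d) d).get? x = pvG (P ++ U) nonUa x := by
  induction U with
  | nil => intro P d hd x; simpa using hd x
  | cons ua U' ih =>
    intro P d hd x
    have hD : (match pvBestBase ua nonUa with
        | some b => if b == "" then d else d.insert ua b
        | none => d)
        = (match pvF nonUa ua with
          | some b => d.insert ua b
          | none => d) := by
      unfold pvF
      cases pvBestBase ua nonUa with
      | none => rfl
      | some b =>
        by_cases hbe : b == ""
        · simp [hbe]
        · simp [hbe]
    have step : ∀ y, ((match pvBestBase ua nonUa with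
        | some b => if b == "" then d else d.insert ua b
        | none => d) : PySem.Dict String String).get? y = pvG (P ++ [ua]) nonUa y := by
      intro y
      rw [hD]
      cases hf : pvF nonUa ua with
      | none =>
        simp only [hd y, pvG, List.mem_append, List.mem_singleton]
        by_cases hy : y = ua
        · subst hy; simp [hf]
        · simp [hy]
      | some b =>
        rw [PySem.Dict.get?_insert]
        by_cases hy : y = ua
        · subst hy; simp [pvG, hf]
        · simp only [if_neg hy, hd y, pvG, List.mem_append, List.mem_singleton]
          simp [hy]
    have := ih (P ++ [ua]) _ step x
    simpa [List.append_assoc] using this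

-- A's inner rescan of uaH, characterized via pvNew
theorem innerA_eq (g : String → Option String) (hh : String) (V : List String) :
    ∀ (acc : List String) (p : PySem.Set String),
    V.foldl (fun st2 ua =>
        if !(PySem.Set.contains st2.2 ua) && (g ua == some hh) then
          (st2.1 ++ [ua], PySem.Set.add st2.2 ua)
        else st2) (acc, p)
      = (acc ++ pvNew p (V.filter (fun ua => g ua == some hh)),
         p ++ pvNew p (V.filter (fun ua => g ua == some hh))) := by
  induction V with
  | nil => intro acc p; simp [pvNew]
  | cons ua V' ih =>
    intro acc p
    set f : (List String × PySem.Set String) → String → (List String × PySem.Set String) :=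
      fun st2 ua =>
        if !(PySem.Set.contains st2.2 ua) && (g ua == some hh) then
          (st2.1 ++ [ua], PySem.Set.add st2.2 ua)
        else st2 with hf
    by_cases hg : g ua = some hh
    · have hfil : (ua :: V').filter (fun ua => g ua == some hh)
          = ua :: V'.filter (fun ua => g ua == some hh) := by
        simp [hg]
      cases hc : PySem.Set.contains p ua with
      | true =>
        have hmem : ua ∈ p := by simpa using hc
        have hstep : f (acc, p) ua = (acc, p) := by rw [hf]; simp [hmem]
        rw [List.foldl_cons, hstep, ih acc p, hfil]
        simp [pvNew, hmem]
      | false =>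
        have hmem : ua ∉ p := by simpa using hc
        have hstep : f (acc, p) ua = (acc ++ [ua], p ++ [ua]) := by
          rw [hf]; simp [hmem, hg, PySem.Set.add]
        rw [List.foldl_cons, hstep, ih (acc ++ [ua]) (p ++ [ua]), hfil]
        simp [pvNew, hmem, List.append_assoc]
    · have hfil : (ua :: V').filter (fun ua => g ua == some hh)
          = V'.filter (fun ua => g ua == some hh) := by
        simp [hg]
      have hstep : f (acc, p) ua = (acc, p) := by rw [hf]; simp [hg]
      rw [List.foldl_cons, hstep, ih acc p, hfil]

-- B's grouping pass, characterized
theorem pvGroup_spec (nonUa : List String) (U : List String) :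
    ∀ (P : List String) (d : PySem.Dict String (List String)) (s : PySem.Set String),
    (∀ h, d.getD h [] = pvNew [] (P.filter (fun ua => pvF nonUa ua == some h))) →
    (∀ x, x ∈ s ↔ x ∈ P ∧ pvF nonUa x ≠ none) →
    (∀ h, (pvGroup (pvBInfo nonUa) U d s).1.getD h []
        = pvNew [] ((P ++ U).filter (fun ua => pvF nonUa ua == some h))) ∧
    (∀ x, x ∈ (pvGroup (pvBInfo nonUa) U d s).2 ↔ x ∈ P ++ U ∧ pvF nonUa x ≠ none) := by
  induction U with
  | nil =>
    intro P d s hd hs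
    constructor
    · intro h; simpa [pvGroup] using hd h
    · intro x; simpa [pvGroup] using hs x
  | cons ua U' ih =>
    intro P d s hd hs
    have happ : P ++ ua :: U' = (P ++ [ua]) ++ U' := by simp
    have hm : pvMatch (pvUaRaw ua) (pvStripPrefix (pvUaRaw ua)) (pvBInfo nonUa) none 0
        = pvBestBase ua nonUa := by
      rw [pvMatch_eq]; simp [pvBestBase, pvUaNorm]
    have hstep : pvGroup (pvBInfo nonUa) (ua :: U') d s
        = (if PySem.Set.contains s ua then pvGroup (pvBInfo nonUa) U' d s
           else match pvBestBase ua nonUa with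
             | some b =>
               if b == "" then pvGroup (pvBInfo nonUa) U' d s
               else pvGroup (pvBInfo nonUa) U' (d.modify b [] (· ++ [ua])) (PySem.Set.add s ua)
             | none => pvGroup (pvBInfo nonUa) U' d s) := by
      simp only [pvGroup]
      rw [show PySem.Chars.strip (PySem.List.slice (PySem.Chars.strip (PySem.Chars.upper ua.toList)) none (some (-3))) = pvUaRaw ua from rfl, hm]
    rw [hstep, happ]
    cases hcs : PySem.Set.contains s ua with
    | true =>
      rw [if_pos rfl]
      have hmem : ua ∈ s := by simpa using hcs
      obtain ⟨huaP, hne⟩ := (hs ua).1 hmem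
      refine ih (P ++ [ua]) d s ?_ ?_
      · intro h
        rw [List.filter_append]
        by_cases hpred : pvF nonUa ua = some h
        · have hfil : [ua].filter (fun x => pvF nonUa x == some h) = [ua] := by
            simp [hpred]
          rw [hfil, pvNew_append]
          have huaPf : ua ∈ P.filter (fun x => pvF nonUa x == some h) :=
            List.mem_filter.2 ⟨huaP, by simp [hpred]⟩
          have hnil : pvNew ([] ++ pvNew []
              (P.filter (fun x => pvF nonUa x == some h))) [ua] = [] := by
            apply pvNew_nil_of_forall_mem
            intro x hx
            rcases List.mem_singleton.1 hx with rfl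
            simp only [List.nil_append]
            exact (mem_pvNew _ _ _).2 ⟨huaPf, by simp⟩
          rw [hnil, List.append_nil]
          exact hd h
        · have hfil : [ua].filter (fun x => pvF nonUa x == some h) = [] := by
            simp [hpred]
          rw [hfil, List.append_nil]
          exact hd h
      · intro x
        rw [hs x]
        constructor
        · rintro ⟨h1, h2⟩; exact ⟨List.mem_append.2 (Or.inl h1), h2⟩
        · rintro ⟨h1, h2⟩
          rcases List.mem_append.1 h1 with h1 | h1
          · exact ⟨h1, h2⟩
          · rcases List.mem_singleton.1 h1 with rfl
            exact ⟨huaP, h2⟩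
    | false =>
      rw [if_neg (by simp)]
      have hmem : ua ∉ s := by simpa using hcs
      have unchanged : ∀ (hfua : pvF nonUa ua = none),
          (∀ h, d.getD h [] = pvNew [] (((P ++ [ua])).filter (fun x => pvF nonUa x == some h))) ∧
          (∀ x, x ∈ s ↔ x ∈ P ++ [ua] ∧ pvF nonUa x ≠ none) := by
        intro hfua
        constructor
        · intro h
          rw [List.filter_append]
          have hfil : [ua].filter (fun x => pvF nonUa x == some h) = [] := by
            simp [hfua]
          rw [hfil, List.append_nil]
          exact hd h
        · intro x
          rw [hs x]
          constructor
          · rintro ⟨h1, h2⟩; exact ⟨List.mem_append.2 (Or.inl h1), h2⟩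
          · rintro ⟨h1, h2⟩
            rcases List.mem_append.1 h1 with h1 | h1
            · exact ⟨h1, h2⟩
            · rcases List.mem_singleton.1 h1 with rfl
              exact absurd hfua h2
      cases hb : pvBestBase ua nonUa with
      | none =>
        have hfua : pvF nonUa ua = none := by simp [pvF, hb]
        exact ih (P ++ [ua]) d s (unchanged hfua).1 (unchanged hfua).2
      | some b =>
        dsimp only
        by_cases hbe : b = ""
        · have hfua : pvF nonUa ua = none := by simp [pvF, hb, hbe]
          rw [if_pos (by simp [hbe])]
          exact ih (P ++ [ua]) d s (unchanged hfua).1 (unchanged hfua).2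
        · have hfua : pvF nonUa ua = some b := by simp [pvF, hb, hbe]
          have huaP : ua ∉ P := fun hP => hmem ((hs ua).2 ⟨hP, by simp [hfua]⟩)
          rw [if_neg (by simp [hbe])]
          refine ih (P ++ [ua]) _ _ ?_ ?_
          · intro h
            rw [PySem.Dict.getD_modify, List.filter_append]
            by_cases hhb : h = b
            · subst hhb
              have hfil : [ua].filter (fun x => pvF nonUa x == some h) = [ua] := by
                simp [hfua]
              rw [if_pos rfl, hfil, pvNew_append]
              have hnotPf : ua ∉ [] ++ pvNew []
                  (P.filter (fun x => pvF nonUa x == some h)) := by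
                simp only [List.nil_append]
                intro hm2
                exact huaP (List.mem_of_mem_filter ((mem_pvNew _ _ _).1 hm2).1)
              have hone : pvNew ([] ++ pvNew []
                  (P.filter (fun x => pvF nonUa x == some h))) [ua] = [ua] := by
                rw [pvNew, if_neg hnotPf]; rfl
              rw [hone, hd h]
            · have hfil : [ua].filter (fun x => pvF nonUa x == some h) = [] := by
                simp [hfua]; exact fun hx => hhb hx.symm
              rw [if_neg hhb, hfil, List.append_nil]
              exact hd h
          · intro x
            rw [show PySem.Set.add s ua = s ++ [ua] from by simp [PySem.Set.add, hmem],
              List.mem_append]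
            constructor
            · rintro (h1 | h1)
              · obtain ⟨h2, h3⟩ := (hs x).1 h1
                exact ⟨List.mem_append.2 (Or.inl h2), h3⟩
              · rcases List.mem_singleton.1 h1 with rfl
                exact ⟨List.mem_append.2 (Or.inr (List.mem_singleton.2 rfl)), by simp [hfua]⟩
            · rintro ⟨h1, h2⟩
              rcases List.mem_append.1 h1 with h1 | h1
              · exact Or.inl ((hs x).2 ⟨h1, h2⟩)
              · exact Or.inr h1

-- A's outer building loop equals B's emission pass
theorem outer_eq (g : String → Option String) (U : List String)
    (gd : PySem.Dict String (List String))
    (hU : ∀ x b, g x = some b → x ∈ U)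
    (hgrp : ∀ h, gd.getD h [] = pvNew [] (U.filter (fun ua => g ua == some h))) :
    ∀ (N' Q acc : List String) (p e : PySem.Set String),
      (∀ x, x ∈ p ↔ ∃ b, g x = some b ∧ b ∈ Q) →
      (∀ x, x ∈ e ↔ x ∈ Q) →
      (N'.foldl (fun st h =>
        U.foldl (fun st2 ua =>
          if !(PySem.Set.contains st2.2 ua) && (g ua == some h) then
            (st2.1 ++ [ua], PySem.Set.add st2.2 ua)
          else st2) (st.1 ++ [h], st.2)) (acc, p)).1
        = pvEmit gd N' acc e ∧
      (∀ x, x ∈ (N'.foldl (fun st h =>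
        U.foldl (fun st2 ua =>
          if !(PySem.Set.contains st2.2 ua) && (g ua == some h) then
            (st2.1 ++ [ua], PySem.Set.add st2.2 ua)
          else st2) (st.1 ++ [h], st.2)) (acc, p)).2 ↔ ∃ b, g x = some b ∧ b ∈ Q ++ N') := by
  intro N'
  induction N' with
  | nil =>
    intro Q acc p e hp he
    exact ⟨rfl, fun x => by simpa using hp x⟩
  | cons h N'' ih =>
    intro Q acc p e hp he
    set fA : (List String × PySem.Set String) → String → (List String × PySem.Set String) :=
      fun st h =>
        U.foldl (fun st2 ua =>
          if !(PySem.Set.contains st2.2 ua) && (g ua == some h) then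
            (st2.1 ++ [ua], PySem.Set.add st2.2 ua)
          else st2) (st.1 ++ [h], st.2) with hfA
    have happ : Q ++ h :: N'' = (Q ++ [h]) ++ N'' := by simp
    have hstepA : fA (acc, p) h
        = (acc ++ [h] ++ pvNew p (U.filter (fun ua => g ua == some h)),
           p ++ pvNew p (U.filter (fun ua => g ua == some h))) := by
      rw [hfA]
      exact innerA_eq g h U (acc ++ [h]) p
    by_cases hQ : h ∈ Q
    · have hme : PySem.Set.contains e h = true := by simpa using (he h).2 hQ
      have hstepB : pvEmit gd (h :: N'') acc e = pvEmit gd N'' (acc ++ [h]) e := by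
        simp only [pvEmit]; rw [if_pos hme]
      have hnil : pvNew p (U.filter (fun ua => g ua == some h)) = [] := by
        apply pvNew_nil_of_forall_mem
        intro x hx
        obtain ⟨hxU, hpred⟩ := List.mem_filter.1 hx
        exact (hp x).2 ⟨h, by simpa using hpred, hQ⟩
      rw [List.foldl_cons, hstepA, hstepB, hnil, List.append_nil, List.append_nil, happ]
      apply ih (Q ++ [h]) (acc ++ [h]) p e
      · intro x
        rw [hp x]
        constructor
        · rintro ⟨b, h1, h2⟩; exact ⟨b, h1, List.mem_append.2 (Or.inl h2)⟩
        · rintro ⟨b, h1, h2⟩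
          rcases List.mem_append.1 h2 with h2 | h2
          · exact ⟨b, h1, h2⟩
          · rcases List.mem_singleton.1 h2 with rfl
            exact ⟨b, h1, hQ⟩
      · intro x
        rw [he x]
        constructor
        · intro h1; exact List.mem_append.2 (Or.inl h1)
        · intro h1
          rcases List.mem_append.1 h1 with h1 | h1
          · exact h1
          · rcases List.mem_singleton.1 h1 with rfl
            exact hQ
    · have hnotmem : h ∉ e := fun hm => hQ ((he h).1 hm)
      have hme : PySem.Set.contains e h = false := by simpa using hnotmem
      have hstepB : pvEmit gd (h :: N'') acc e
          = pvEmit gd N'' (acc ++ [h] ++ gd.getD h []) (PySem.Set.add e h) := by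
        simp only [pvEmit]; rw [if_neg (by simpa using hnotmem)]
      have hadd : PySem.Set.add e h = e ++ [h] := by simp [PySem.Set.add, hnotmem]
      have hnew : pvNew p (U.filter (fun ua => g ua == some h)) = gd.getD h [] := by
        rw [hgrp h]
        apply pvNew_congr
        intro x hx
        obtain ⟨hxU, hpred⟩ := List.mem_filter.1 hx
        have hgx : g x = some h := by simpa using hpred
        constructor
        · intro hxp
          obtain ⟨b, h1, h2⟩ := (hp x).1 hxp
          rw [hgx] at h1
          rcases Option.some_inj.1 h1 with rfl
          exact absurd h2 hQ
        · intro hx0; exact absurd hx0 (by simp)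
      rw [List.foldl_cons, hstepA, hstepB, hadd, hnew, happ]
      apply ih (Q ++ [h]) (acc ++ [h] ++ gd.getD h []) (p ++ gd.getD h []) (e ++ [h])
      · intro x
        rw [← hnew, List.mem_append, mem_pvNew]
        constructor
        · rintro (h1 | ⟨h1, _⟩)
          · obtain ⟨b, h2, h3⟩ := (hp x).1 h1
            exact ⟨b, h2, List.mem_append.2 (Or.inl h3)⟩
          · obtain ⟨hxU, hpred⟩ := List.mem_filter.1 h1
            exact ⟨h, by simpa using hpred, List.mem_append.2 (Or.inr (List.mem_singleton.2 rfl))⟩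
        · rintro ⟨b, h1, h2⟩
          rcases List.mem_append.1 h2 with h2 | h2
          · exact Or.inl ((hp x).2 ⟨b, h1, h2⟩)
          · rcases List.mem_singleton.1 h2 with rfl
            by_cases hxp : x ∈ p
            · exact Or.inl hxp
            · refine Or.inr ⟨List.mem_filter.2 ⟨hU x b h1, by simp [h1]⟩, hxp⟩
      · intro x
        simp [List.mem_append, he x]

theorem contains_eq_of_mem_iff (s t : PySem.Set String) (x : String)
    (h : x ∈ s ↔ x ∈ t) : PySem.Set.contains s x = PySem.Set.contains t x := by
  cases hcs : PySem.Set.contains s x <;> cases hct : PySem.Set.contains t x <;> simp_all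

-- ===== VERDICT (by name: the statement is the Claim_ definition above) =====
theorem organize_headers_spec : Claim_equal_organize_headers := by
  intro headers _dom
  unfold Spec_organize_headers
  simp only [organize_headers, organize_headers_alt]
  set U := headers.filter (fun h => pvIsUA h) with hUdef
  set N := headers.filter (fun h => !(pvIsUA h)) with hNdef
  -- A's dict lookup is pvG U N
  have hfun : PySem.Dict.get? (U.foldl (fun d ua =>
      match pvBestBase ua N with
      | some b => if b == "" then d else d.insert ua b
      | none => d) PySem.Dict.empty) = pvG U N := by
    funext x
    have := uaToBase_get? N U [] PySem.Dict.empty (fun y => by simp [pvG]) x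
    simpa using this
  rw [hfun]
  -- B's grouping pass
  obtain ⟨hgm1, hgm2⟩ := pvGroup_spec N U [] PySem.Dict.empty []
    (fun h => by simp [pvNew]) (fun x => by simp)
  simp only [List.nil_append] at hgm1
  -- pvF and pvG agree on U, so the groups are the pvG-groups
  have hgrp : ∀ h, (pvGroup (pvBInfo N) U PySem.Dict.empty []).1.getD h []
      = pvNew [] (U.filter (fun ua => pvG U N ua == some h)) := by
    intro h
    rw [hgm1 h]
    congr 1
    apply List.filter_congr
    intro x hx
    simp [pvG, hx]
  have hUhyp : ∀ x b, pvG U N x = some b → x ∈ U := by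
    intro x b hb
    unfold pvG at hb
    by_cases hx : x ∈ U
    · exact hx
    · rw [if_neg hx] at hb; exact absurd hb (by simp)
  obtain ⟨h1, h2⟩ := outer_eq (pvG U N) U _ hUhyp hgrp N [] [] [] []
    (fun x => by simp) (fun x => by simp)
  rw [h1]
  congr 1
  apply List.filter_congr
  intro x hx
  congr 1
  apply contains_eq_of_mem_iff
  rw [h2 x, hgm2 x]
  simp only [List.nil_append]
  constructor
  · rintro ⟨b, hb1, hb2⟩
    refine ⟨hUhyp x b hb1, ?_⟩
    have hfx : pvF N x = some b := by
      unfold pvG at hb1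
      rwa [if_pos (hUhyp x b hb1)] at hb1
    simp [hfx]
  · rintro ⟨hxU, hne⟩
    obtain ⟨b, hb⟩ := Option.ne_none_iff_exists'.1 hne
    exact ⟨b, by simpa [pvG, hxU] using hb, pvF_mem N x b hb⟩
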